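-- pv_equiv track=rewrite | github.com/shukabh/IO_privacy | helpers.py | check_alternating_signs
-- ===== SOURCE A (Python) =====
-- def check_alternating_signs(lst):
--     for i, val in enumerate(lst):
--         if i % 2 == 0:
--             if val <= 0:
--                 return False
--         else:
--             if val >= 0:
--                 return False
--     return True
-- ===== SOURCE B (Python) =====
-- def check_alternating_signs(lst):
--     return all(x > 0 for x in lst[::2]) and all(x < 0 for x in lst[1::2])
-- ===== Notes on version B (the rewrite author's own statement) =====
-- stated objective: idiomatic
-- what changed: Replaces A's single indexed loop with parity branching and early returns by two slice-based all() passes: every even-index element positive and every odd-index element negative.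
import Mathlib
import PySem

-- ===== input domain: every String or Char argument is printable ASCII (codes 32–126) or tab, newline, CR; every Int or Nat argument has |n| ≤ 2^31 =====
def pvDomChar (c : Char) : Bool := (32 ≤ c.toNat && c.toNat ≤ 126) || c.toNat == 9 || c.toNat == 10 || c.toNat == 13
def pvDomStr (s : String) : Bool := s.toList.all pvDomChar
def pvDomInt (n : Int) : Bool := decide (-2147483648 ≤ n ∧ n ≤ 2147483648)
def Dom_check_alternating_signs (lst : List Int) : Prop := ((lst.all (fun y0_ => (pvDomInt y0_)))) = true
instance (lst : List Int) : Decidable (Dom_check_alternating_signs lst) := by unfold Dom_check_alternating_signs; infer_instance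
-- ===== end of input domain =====

-- B replaces A's indexed parity-branch loop by two slice-based all-passes (idiomatic; same cost).


-- ===== PORT A =====
-- loop over (i, val) = enumerate(lst), early return False on a failing branch
def check_alternating_signs_go (i : Nat) (rest : List Int) : Bool :=
  match rest with
  | [] => true
  | val :: rest =>
    if i % 2 == 0 then
      if val ≤ 0 then false else check_alternating_signs_go (i + 1) rest
    else
      if val ≥ 0 then false else check_alternating_signs_go (i + 1) rest

def check_alternating_signs (lst : List Int) : Bool :=
  check_alternating_signs_go 0 lst

-- ===== PORT B =====
-- step-2 slices ported by hand (exact for lst[::2] and, applied to lst.drop 1, for lst[1::2])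
def pvStep2 {α : Type} : List α → List α
  | [] => []
  | [x] => [x]
  | x :: _ :: xs => x :: pvStep2 xs

def check_alternating_signs_alt (lst : List Int) : Bool :=
  (pvStep2 lst).all (fun x => decide (0 < x)) &&
  (pvStep2 (lst.drop 1)).all (fun x => decide (x < 0))

-- ===== PRECONDITION & SPEC =====
def Spec_check_alternating_signs (lst : List Int) (out : Bool) : Prop := out = check_alternating_signs_alt lst
instance (lst : List Int) (out : Bool) : Decidable (Spec_check_alternating_signs lst out) := by unfold Spec_check_alternating_signs; infer_instance

-- ===== CLAIM (what is proved, stated in full; the proofs are below) =====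
def Claim_equal_check_alternating_signs : Prop := ∀ (lst : List Int), Dom_check_alternating_signs lst → Spec_check_alternating_signs lst (check_alternating_signs lst)

-- ===== LEMMAS AND PROOFS =====

theorem pvStep2_cons {α : Type} (x : α) (xs : List α) :
    pvStep2 (x :: xs) = x :: pvStep2 (xs.drop 1) := by
  cases xs <;> rfl

-- main invariant: the A-loop from index i computes the two slice-passes, swapped by i's parity
theorem go_eq (xs : List Int) : ∀ i : Nat,
    check_alternating_signs_go i xs =
      if i % 2 = 0 then
        ((pvStep2 xs).all (fun x => decide (0 < x)) &&
         (pvStep2 (xs.drop 1)).all (fun x => decide (x < 0)))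
      else
        ((pvStep2 xs).all (fun x => decide (x < 0)) &&
         (pvStep2 (xs.drop 1)).all (fun x => decide (0 < x))) := by
  induction xs with
  | nil => intro i; simp [check_alternating_signs_go, pvStep2]
  | cons v rest ih =>
    intro i
    have h1 := ih (i + 1)
    rcases Nat.even_or_odd i with h | h
    · have hi : i % 2 = 0 := Nat.even_iff.mp h
      have hi1 : (i + 1) % 2 = 1 := by omega
      simp only [check_alternating_signs_go, hi, hi1, pvStep2_cons] at *
      by_cases hv : v ≤ 0
      · simp [hv, show ¬ (0 < v) by omega]
      · simp only [if_neg hv, h1, if_neg (by omega : ¬ (1 = 0))]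
        simp [show 0 < v by omega, Bool.and_comm, Bool.and_left_comm]
    · have hi : i % 2 = 1 := Nat.odd_iff.mp h
      have hi1 : (i + 1) % 2 = 0 := by omega
      simp only [check_alternating_signs_go, hi, hi1, pvStep2_cons] at *
      by_cases hv : v ≥ 0
      · simp [hv, show ¬ (v < 0) by omega]
      · simp only [if_neg hv, h1, if_neg (by omega : ¬ (1 = 0))]
        simp [show v < 0 by omega, Bool.and_comm]

-- ===== VERDICT (by name: the statement is the Claim_ definition above) =====
theorem check_alternating_signs_spec : Claim_equal_check_alternating_signs := by
  intro lst _
  unfold Spec_check_alternating_signs check_alternating_signs check_alternating_signs_alt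
  simpa using go_eq lst 0
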